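-- pv_equiv track=rewrite | github.com/EgonFerri/Ex2_NN_backpropr | Exercise2/Pytorch_improvements/ex2_pytorch_grid_search.py | n_neurons
-- ===== SOURCE A (Python) =====
-- def n_neurons(num_layers):
--   '''Given the number of layer it returns a list with legth equal to the
--   number of layer. Each element of the list is an integer that represents the
--   number of neuron for the layer corresponding to its index'''
--   if num_layers < 2:# error
--     return 'Error: number of layer has to be >= 2'
--   else:
--     neurons = [50]*2
--     for i in range(2, num_layers):
--       neurons += [50*i]
--     if max(neurons) > input_size: # error
--       return 'Error: number of neuron is higher than input size'
--     else:
--       return sorted(neurons, reverse=True)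
--
-- input_size = 32 * 32 * 3
-- ===== SOURCE B (Python) =====
-- input_size = 32 * 32 * 3
--
-- def n_neurons(num_layers):
--   if num_layers < 2:
--     return 'Error: number of layer has to be >= 2'
--   if num_layers >= 3 and 50 * (num_layers - 1) > input_size:
--     return 'Error: number of neuron is higher than input size'
--   return [50 * i for i in range(num_layers - 1, 1, -1)] + [50, 50]
-- ===== Notes on version B (the rewrite author's own statement) =====
-- stated objective: faster
-- what changed: B emits the descending neuron list directly as a countdown-range comprehension appended with [50, 50], removing A's accumulation loop, the max() scan and the sorted(reverse=True) call, and checks the size bound with the closed form 50*(num_layers-1).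
import Mathlib
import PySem

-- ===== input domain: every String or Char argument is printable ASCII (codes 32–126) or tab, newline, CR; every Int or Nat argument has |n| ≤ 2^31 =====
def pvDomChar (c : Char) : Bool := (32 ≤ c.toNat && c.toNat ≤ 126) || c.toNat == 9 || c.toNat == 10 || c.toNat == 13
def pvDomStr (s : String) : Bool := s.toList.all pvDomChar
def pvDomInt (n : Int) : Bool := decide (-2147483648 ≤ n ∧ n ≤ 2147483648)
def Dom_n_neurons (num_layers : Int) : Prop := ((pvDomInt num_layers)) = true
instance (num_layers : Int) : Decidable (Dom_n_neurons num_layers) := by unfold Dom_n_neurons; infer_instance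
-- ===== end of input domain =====

-- B builds the descending list directly with a countdown range instead of A's
-- append loop + max() scan + sorted(reverse=True); return values proved equal on Pre_.

-- ===== PORT A =====
-- Python A: neurons = [50]*2; for i in range(2, num_layers): neurons += [50*i];
-- then checks max(neurons) > input_size (input_size = 3072) and returns sorted(neurons, reverse=True).
-- On the two error branches A returns a STRING (not a List Int); those inputs are excluded by Pre_,
-- and the port returns [] there.
def n_neurons (num_layers : Int) : List Int :=
  if num_layers < 2 then []
  else
    let neurons :=
      (PySem.List.pyRange 2 num_layers 1).foldl (fun acc i => acc ++ [50 * i]) [50, 50]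
    match PySem.List.max? neurons (fun x => x) with
    | none => []
    | some m =>
      if m > 3072 then []
      else PySem.List.sorted neurons (fun x => x) true

-- ===== PORT B =====
-- Python B: [50*i for i in range(num_layers-1, 1, -1)] + [50, 50], after the same two guards.
def n_neurons_alt (num_layers : Int) : List Int :=
  if num_layers < 2 then []
  else if num_layers ≥ 3 ∧ 50 * (num_layers - 1) > 3072 then []
  else (PySem.List.pyRange (num_layers - 1) 1 (-1)).map (fun i => 50 * i) ++ [50, 50]

-- ===== PRECONDITION & SPEC =====
-- Pre_ excludes exactly the inputs on which Python A returns an error STRING instead of a list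
-- (num_layers < 2, or the neuron count 50*(num_layers-1) exceeds input_size = 3072).
def Pre_n_neurons (num_layers : Int) : Prop :=
  2 ≤ num_layers ∧ 50 * (num_layers - 1) ≤ 3072
instance (num_layers : Int) : Decidable (Pre_n_neurons num_layers) := by
  unfold Pre_n_neurons; infer_instance

def pvWitness_n_neurons : Int := (5)

def Spec_n_neurons (num_layers : Int) (out : List Int) : Prop := out = n_neurons_alt num_layers
instance (num_layers : Int) (out : List Int) : Decidable (Spec_n_neurons num_layers out) := by
  unfold Spec_n_neurons; infer_instance

-- ===== CLAIM (what is proved, stated in full; the proofs are below) =====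
def Claim_equal_n_neurons : Prop := ∀ (num_layers : Int), Dom_n_neurons num_layers → Pre_n_neurons num_layers → Spec_n_neurons num_layers (n_neurons num_layers)

-- ===== LEMMAS AND PROOFS =====

-- ===== VERDICT (by name: the statement is the Claim_ definition above) =====
theorem n_neurons_spec : Claim_equal_n_neurons := by
  intro n _ hp
  unfold Spec_n_neurons
  obtain ⟨h1, h2⟩ := hp
  have h3 : n ≤ 62 := by omega
  interval_cases n <;> decide
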